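-- pv_equiv track=rewrite | github.com/drondert/python-course | hw-2-4-1.py | count_divisible_second
-- ===== SOURCE A (Python) =====
-- DIVIDERS = range(2, 10)
--
-- def count_divisible_second(l_bound, u_bound):  # O(N^2)
--     div_count = {}  # O(1)
--     for divider in DIVIDERS:  # O(N)
--         div_count[divider] = 0  # O(1)
--         for num in range(l_bound, u_bound + 1):  # O(N)
--             if num % divider == 0:  # O(1)
--                 div_count[divider] = div_count[divider] + 1  # O(N)
--     return div_count
-- ===== SOURCE B (Python) =====
-- DIVIDERS = range(2, 10)
--
--
-- def count_divisible_second(l_bound, u_bound):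
--     # Closed form: multiples of d in [l, u] = u//d - (l-1)//d (0 if the range is empty).
--     return {
--         d: (u_bound // d - (l_bound - 1) // d if l_bound <= u_bound else 0)
--         for d in DIVIDERS
--     }
-- ===== Notes on version B (the rewrite author's own statement) =====
-- stated objective: faster
-- what changed: Replaces the per-number scan of range(l_bound, u_bound+1) for each divider by the closed-form floor-division count u//d - (l-1)//d, built with a dict comprehension.
import Mathlib
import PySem

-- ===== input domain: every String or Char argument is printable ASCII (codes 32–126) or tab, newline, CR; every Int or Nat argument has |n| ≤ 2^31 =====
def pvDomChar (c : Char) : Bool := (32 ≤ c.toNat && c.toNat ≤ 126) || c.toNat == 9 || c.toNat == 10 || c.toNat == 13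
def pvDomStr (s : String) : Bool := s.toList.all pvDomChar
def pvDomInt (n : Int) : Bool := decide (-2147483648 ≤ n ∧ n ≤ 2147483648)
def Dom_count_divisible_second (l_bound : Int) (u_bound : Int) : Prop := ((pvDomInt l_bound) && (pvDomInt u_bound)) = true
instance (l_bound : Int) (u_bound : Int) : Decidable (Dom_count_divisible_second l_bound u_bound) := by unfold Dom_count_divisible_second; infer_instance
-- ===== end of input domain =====

-- B replaces A's per-number scan of range(l_bound, u_bound+1) for each divider by the
-- closed-form floor-division count u//d - (l-1)//d (objective: asymptotically faster).

-- ===== PORT A =====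
-- DIVIDERS = range(2, 10)
def pvDIVIDERS : List Int := PySem.List.pyRange 2 10 1

def count_divisible_second (l_bound : Int) (u_bound : Int) : List (Int × Int) :=
  -- div_count = {}; for divider in DIVIDERS: div_count[divider] = 0;
  --   for num in range(l_bound, u_bound+1): if num % divider == 0: div_count[divider] += 1
  (pvDIVIDERS.foldl
    (fun div_count divider =>
      (PySem.List.pyRange l_bound (u_bound + 1) 1).foldl
        (fun div_count num =>
          if PySem.Int.mod num divider = 0 then
            div_count.insert divider (div_count.getD divider 0 + 1)
          else div_count)
        (div_count.insert divider 0))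
    (PySem.Dict.empty : PySem.Dict Int Int)).items

-- ===== PORT B =====
def count_divisible_second_alt (l_bound : Int) (u_bound : Int) : List (Int × Int) :=
  pvDIVIDERS.map (fun d =>
    (d, if l_bound ≤ u_bound then
          PySem.Int.floordiv u_bound d - PySem.Int.floordiv (l_bound - 1) d
        else 0))

-- ===== PRECONDITION & SPEC =====
def Spec_count_divisible_second (l_bound : Int) (u_bound : Int) (out : List (Int × Int)) : Prop := out = count_divisible_second_alt l_bound u_bound
instance (l_bound : Int) (u_bound : Int) (out : List (Int × Int)) : Decidable (Spec_count_divisible_second l_bound u_bound out) := by unfold Spec_count_divisible_second; infer_instance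

-- ===== CLAIM (what is proved, stated in full; the proofs are below) =====
def Claim_equal_count_divisible_second : Prop := ∀ (l_bound : Int) (u_bound : Int), Dom_count_divisible_second l_bound u_bound → Spec_count_divisible_second l_bound u_bound (count_divisible_second l_bound u_bound)

-- ===== LEMMAS AND PROOFS =====

-- A's inner loop only touches the key `divider` (here k), which the outer loop just set:
-- starting from d.insert k c it adds 1 per multiple of k, i.e. countP over the range.
theorem pv_inner_loop (xs : List Int) (d : PySem.Dict Int Int) (k c : Int) :
    xs.foldl
        (fun div_count num =>
          if PySem.Int.mod num k = 0 then
            div_count.insert k (div_count.getD k 0 + 1)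
          else div_count)
        (d.insert k c)
    = d.insert k (c + (xs.countP (fun num => PySem.Int.mod num k = 0) : Int)) := by
  induction xs generalizing c with
  | nil => simp
  | cons x xs ih =>
    simp only [List.foldl_cons, List.countP_cons]
    by_cases h : PySem.Int.mod x k = 0
    · rw [if_pos h, PySem.Dict.getD_insert_self, PySem.Dict.insert_insert_self, ih]
      simp [h]
      ring_nf
    · rw [if_neg h, ih]
      simp [h]

-- x/k - (x-1)/k is the 0/1 indicator of k ∣ x (Euclidean division, 0 < k).
theorem pv_ediv_step (k x : Int) (hk : 0 < k) :
    x / k - (x - 1) / k = if x % k = 0 then 1 else 0 := by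
  have hq : k * ((x - 1) / k) + (x - 1) % k = x - 1 := Int.mul_ediv_add_emod _ _
  set q := (x - 1) / k with hqdef
  set r := (x - 1) % k with hrdef
  have hr0 : 0 ≤ r := Int.emod_nonneg _ (ne_of_gt hk)
  have hrk : r < k := Int.emod_lt_of_pos _ hk
  by_cases hc : r + 1 = k
  · have hx : x = 0 + (q + 1) * k := by linear_combination (-1 : Int) * hq + hc
    have hdiv : x / k = q + 1 := by
      rw [hx, Int.add_mul_ediv_right _ _ (ne_of_gt hk)]; simp
    have hmod : x % k = 0 := by rw [hx, Int.add_mul_emod_self_right]; simp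
    rw [hdiv, hmod, if_pos rfl]; ring
  · have hx : x = (r + 1) + q * k := by linear_combination (-1 : Int) * hq
    have hdiv : x / k = q := by
      rw [hx, Int.add_mul_ediv_right _ _ (ne_of_gt hk),
        Int.ediv_eq_zero_of_lt (by omega) (by omega)]
      ring
    have hmod : x % k = r + 1 := by
      rw [hx, Int.add_mul_emod_self_right, Int.emod_eq_of_lt (by omega) (by omega)]
    rw [hdiv, hmod, if_neg (by omega)]
    omega

-- the count of multiples of k in range(l, u+1) equals the closed form used by B.
theorem pv_count_closed (k : Int) (hk : 0 < k) (l u : Int) :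
    ((PySem.List.pyRange l (u + 1) 1).countP (fun num => PySem.Int.mod num k = 0) : Int)
    = (if l ≤ u then PySem.Int.floordiv u k - PySem.Int.floordiv (l - 1) k else 0) := by
  rw [PySem.Int.floordiv_eq_ediv_of_pos hk, PySem.Int.floordiv_eq_ediv_of_pos hk]
  by_cases hlu : l ≤ u
  · rw [if_pos hlu]
    obtain ⟨n, hn⟩ : ∃ n : Nat, u = l + n := ⟨(u - l).toNat, by omega⟩
    subst hn
    induction n generalizing l with
    | zero =>
      simp only [Nat.cast_zero, add_zero]
      have hone : PySem.List.pyRange l (l + 1) 1 = [l] := by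
        rw [PySem.List.pyRange_one_cons (by omega)]
        simp
      rw [hone]
      simp only [List.countP_cons, List.countP_nil, Nat.zero_add]
      rw [PySem.Int.mod_eq_emod_of_pos hk, pv_ediv_step k l hk]
      simp only [decide_eq_true_eq]
      split_ifs with h <;> simp
    | succ m ih =>
      rw [PySem.List.pyRange_one_cons (by omega)]
      simp only [List.countP_cons]
      have hrest := ih (l + 1) (by omega)
      have hl1 : l + 1 - 1 = l := by ring
      rw [hl1] at hrest
      push_cast
      rw [(by ring : l + ((m : Int) + 1) + 1 = l + 1 + (m : Int) + 1), hrest,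
        PySem.Int.mod_eq_emod_of_pos hk]
      have hstep := pv_ediv_step k l hk
      have h2 : l + ((m : Int) + 1) = l + 1 + (m : Int) := by ring
      rw [h2]
      simp only [decide_eq_true_eq]
      split_ifs with h <;> simp [h] at hstep ⊢ <;> linarith
  · rw [if_neg hlu]
    have hempty : PySem.List.pyRange l (u + 1) 1 = [] := by
      simp [PySem.List.pyRange_one, (by omega : ((u + 1) - l).toNat = 0)]
    simp [hempty]

-- ===== VERDICT (by name: the statement is the Claim_ definition above) =====
theorem count_divisible_second_spec : Claim_equal_count_divisible_second := by
  intro l u _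
  unfold Spec_count_divisible_second count_divisible_second count_divisible_second_alt
  have hD : pvDIVIDERS = [2, 3, 4, 5, 6, 7, 8, 9] := by decide
  rw [hD]
  simp only [List.foldl_cons, List.foldl_nil, List.map_cons, List.map_nil]
  rw [pv_inner_loop, pv_inner_loop, pv_inner_loop, pv_inner_loop,
      pv_inner_loop, pv_inner_loop, pv_inner_loop, pv_inner_loop]
  rw [pv_count_closed 2 (by omega), pv_count_closed 3 (by omega),
      pv_count_closed 4 (by omega), pv_count_closed 5 (by omega),
      pv_count_closed 6 (by omega), pv_count_closed 7 (by omega),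
      pv_count_closed 8 (by omega), pv_count_closed 9 (by omega)]
  simp [PySem.Dict.insert, PySem.Dict.empty]
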